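-- pv_equiv track=rewrite | github.com/smart-patrol/ai-ml-interview-prep-and-more | data-structures-python/ChallangeLists.py | max_min3
-- ===== SOURCE A (Python) =====
-- from typing import List
-- from collections import deque
--
-- def max_min3(lst:List[int]) -> List[int]:
--     q = deque(lst)
--
--     out = []
--     i=1
--     j=len(lst)
--
--     while j >= i and len(q) > 0:
--         if i % 2 == 0:
--             x = q.popleft()
--             out.append(x)
--         else:
--             y = q.pop()
--             out.append(y)
--         i += 1
--
--     return out
-- ===== SOURCE B (Python) =====
-- def max_min3(lst):
--     n = len(lst)
--     backs = lst[::-1][:(n + 1) // 2]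
--     fronts = lst[:n // 2]
--     out = []
--     for b, f in zip(backs, fronts):
--         out.append(b)
--         out.append(f)
--     if n % 2 == 1:
--         out.append(backs[-1])
--     return out
-- ===== Notes on version B (the rewrite author's own statement) =====
-- stated objective: alternative
-- what changed: Replaces A's stateful deque-pop while loop (counter-parity deciding pop vs popleft) with a build-then-merge form: precompute the back slice reversed(lst)[:ceil(n/2)] and the front slice lst[:n//2], zip-interleave them back-first, and append the middle element when n is odd.
import Mathlib
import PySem

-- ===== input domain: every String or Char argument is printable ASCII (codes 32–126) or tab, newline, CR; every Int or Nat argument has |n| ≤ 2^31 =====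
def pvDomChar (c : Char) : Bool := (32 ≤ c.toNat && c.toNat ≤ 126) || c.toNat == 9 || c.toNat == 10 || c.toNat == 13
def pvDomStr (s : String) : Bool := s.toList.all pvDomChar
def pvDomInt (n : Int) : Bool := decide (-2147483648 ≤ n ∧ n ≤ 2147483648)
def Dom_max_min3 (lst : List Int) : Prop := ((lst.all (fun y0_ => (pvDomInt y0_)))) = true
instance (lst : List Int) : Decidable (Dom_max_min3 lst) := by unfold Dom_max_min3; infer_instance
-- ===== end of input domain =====

-- B re-implements the back/front alternation slice-wise: two precomputed slices interleaved, no deque pop loop (objective: alternative; same O(n), measured constant-factor faster via bulk slicing).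

-- ===== PORT A =====
-- the while loop: q is the deque (popleft = head+tail, pop = getLast+dropLast), i the step counter, j = len(lst)
def pvLoopA (j : Int) : List Int → Int → List Int → List Int
  | q, i, out =>
    if h : j ≥ i ∧ q.length > 0 then
      if PySem.Int.mod i 2 == 0 then
        pvLoopA j q.tail (i + 1) (out ++ [q.headI])
      else
        pvLoopA j q.dropLast (i + 1) (out ++ [q.getLast (List.length_pos_iff.mp h.2)])
    else out
  termination_by q => q.length
  decreasing_by
    all_goals
      have _h2 := h.2
      simp only [List.length_tail, List.length_dropLast]
      omega

def max_min3 (lst : List Int) : List Int :=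
  pvLoopA (lst.length : Int) lst 1 []

-- ===== PORT B =====
-- lst[::-1] ported as List.reverse (PySem.List.slice?_none_none_neg_one);
-- backs[-1] is only read when n is odd, where pyGet? is some, so the .getD 0 default is never taken
def max_min3_alt (lst : List Int) : List Int :=
  let n : Int := (lst.length : Int)
  let backs := PySem.List.slice lst.reverse none (some (PySem.Int.floordiv (n + 1) 2))
  let fronts := PySem.List.slice lst none (some (PySem.Int.floordiv n 2))
  let out := (backs.zip fronts).foldl (fun acc p => (acc ++ [p.1]) ++ [p.2]) []
  if PySem.Int.mod n 2 == 1 then out ++ [(PySem.List.pyGet? backs (-1)).getD 0] else out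

-- ===== PRECONDITION & SPEC =====
def Spec_max_min3 (lst : List Int) (out : List Int) : Prop := out = max_min3_alt lst
instance (lst : List Int) (out : List Int) : Decidable (Spec_max_min3 lst out) := by unfold Spec_max_min3; infer_instance

-- ===== CLAIM (what is proved, stated in full; the proofs are below) =====
def Claim_equal_max_min3 : Prop := ∀ (lst : List Int), Dom_max_min3 lst → Spec_max_min3 lst (max_min3 lst)

-- ===== LEMMAS AND PROOFS =====

theorem pvFoldl_pair_append (Z : List (Int × Int)) (acc : List Int) :
    Z.foldl (fun acc p => (acc ++ [p.1]) ++ [p.2]) acc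
      = acc ++ Z.foldl (fun acc p => (acc ++ [p.1]) ++ [p.2]) [] := by
  induction Z generalizing acc with
  | nil => simp
  | cons p Z ih =>
    simp only [List.foldl_cons]
    rw [ih ((acc ++ [p.1]) ++ [p.2]), ih ((([] : List Int) ++ [p.1]) ++ [p.2])]
    simp

-- B in take/reverse normal form
theorem pvAlt_eq (lst : List Int) :
    max_min3_alt lst =
      (let backs := lst.reverse.take ((lst.length + 1) / 2)
       let fronts := lst.take (lst.length / 2)
       let out := (backs.zip fronts).foldl (fun acc p => (acc ++ [p.1]) ++ [p.2]) []
       if lst.length % 2 = 1 then out ++ [(backs.getLast?).getD 0] else out) := by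
  unfold max_min3_alt
  have h1 : PySem.Int.floordiv ((lst.length : Int) + 1) 2 = (((lst.length + 1) / 2 : Nat) : Int) := by
    exact_mod_cast PySem.Int.floordiv_natCast (lst.length + 1) 2
  have h2 : PySem.Int.floordiv (lst.length : Int) 2 = (((lst.length / 2 : Nat)) : Int) := by
    exact_mod_cast PySem.Int.floordiv_natCast lst.length 2
  have h3 : PySem.Int.mod (lst.length : Int) 2 = (((lst.length % 2 : Nat)) : Int) := by
    exact_mod_cast PySem.Int.mod_natCast lst.length 2
  simp only [h1, h2, h3, PySem.List.slice_to_natCast, PySem.List.pyGet?_neg_one]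
  rcases Nat.mod_two_eq_zero_or_one lst.length with h | h <;> simp [h]

theorem pvAlt_nil : max_min3_alt [] = [] := by decide

theorem pvAlt_single (a : Int) : max_min3_alt [a] = [a] := by
  rw [pvAlt_eq]; simp

theorem pvAlt_step (a l : Int) (m : List Int) :
    max_min3_alt (a :: (m ++ [l])) = l :: a :: max_min3_alt m := by
  rw [pvAlt_eq, pvAlt_eq]
  have hlen : (a :: (m ++ [l])).length = m.length + 2 := by simp
  have hbacks : (a :: (m ++ [l])).reverse.take ((m.length + 2 + 1) / 2)
      = l :: m.reverse.take ((m.length + 1) / 2) := by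
    have hrev : (a :: (m ++ [l])).reverse = l :: (m.reverse ++ [a]) := by simp
    have h3 : (m.length + 2 + 1) / 2 = (m.length + 1) / 2 + 1 := by omega
    rw [hrev, h3, List.take_succ_cons, List.take_append_of_le_length (by simp; omega)]
  have hfronts : (a :: (m ++ [l])).take ((m.length + 2) / 2)
      = a :: m.take (m.length / 2) := by
    have h4 : (m.length + 2) / 2 = m.length / 2 + 1 := by omega
    rw [h4, List.take_succ_cons, List.take_append_of_le_length (by omega)]
  have hpar : (m.length + 2) % 2 = m.length % 2 := by omega
  simp only [hlen, hbacks, hfronts, hpar]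
  rw [List.zip_cons_cons, List.foldl_cons, pvFoldl_pair_append]
  by_cases hodd : m.length % 2 = 1
  · simp only [hodd, if_pos]
    have hmne : m.reverse.take ((m.length + 1) / 2) ≠ [] := by
      rw [Ne, List.take_eq_nil_iff]
      rintro (h0 | hrev0)
      · omega
      · have : m.length = 0 := by simpa using congrArg List.length hrev0
        omega
    obtain ⟨t, ts, hT⟩ := List.exists_cons_of_ne_nil hmne
    rw [hT, List.getLast?_cons_cons, ← hT]
    simp
  · simp only [hodd, if_false]
    simp

-- the loop invariant: i odd and j - i + 1 = |q| pending steps; two loop iterations peel the last and first elements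
theorem pvLoopA_eq (q : List Int) (i j : Int) (out : List Int)
    (hlen : j - i + 1 = (q.length : Int)) (hodd : i % 2 = 1) :
    pvLoopA j q i out = out ++ max_min3_alt q := by
  induction hn : q.length using Nat.strong_induction_on generalizing q i out with
  | _ n ih =>
  subst hn
  have hmd : ∀ t : Int, PySem.Int.mod t 2 = t % 2 := fun t =>
    PySem.Int.mod_eq_emod_of_pos (by omega)
  match q with
  | [] =>
    rw [pvLoopA, dif_neg (by simp), pvAlt_nil]
    simp
  | a :: xs =>
    have hq : (a :: xs).length > 0 := by simp
    have hji : j ≥ i := by simp at hlen; omega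
    have hmodne : (PySem.Int.mod i 2 == 0) = false := by rw [hmd]; simp; omega
    rw [pvLoopA, dif_pos ⟨hji, hq⟩, hmodne]
    simp only [Bool.false_eq_true, if_false]
    match xs with
    | [] =>
      -- q = [a]: one pop, then the guard fails
      show pvLoopA j [] (i + 1) (out ++ [a]) = out ++ max_min3_alt [a]
      rw [pvLoopA, dif_neg (by simp), pvAlt_single]
    | b :: ys =>
      -- q = a :: xs with xs = b :: ys ≠ []: pop last l, then popleft a, recurse on middle m
      have hxsne : (b :: ys) ≠ [] := by simp
      set l := (b :: ys).getLast hxsne with hl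
      set m := (b :: ys).dropLast with hm
      have hxsm : b :: ys = m ++ [l] := (List.dropLast_concat_getLast hxsne).symm
      have hdrop : (a :: b :: ys).dropLast = a :: m := rfl
      have hlast : ∀ (h : (a :: b :: ys) ≠ []), (a :: b :: ys).getLast h = l := by
        intro h
        rw [List.getLast_cons hxsne]
      rw [hdrop, hlast]
      -- second step: i+1 is even, popleft a
      have hmlen : (b :: ys).length = m.length + 1 := by rw [hxsm]; simp
      have hlen' : j - i + 1 = (m.length : Int) + 2 := by
        simp at hlen hmlen; omega
      have hmod1 : (PySem.Int.mod (i + 1) 2 == 0) = true := by rw [hmd]; simp; omega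
      rw [pvLoopA, dif_pos ⟨by omega, by simp⟩, if_pos hmod1]
      show pvLoopA j m (i + 1 + 1) ((out ++ [l]) ++ [a]) = _
      -- recurse on m at i+2 (odd again)
      rw [ih m.length (by simp only [List.length_cons] at hmlen ⊢; omega) m (i + 1 + 1) _
            (by omega) (by omega) rfl]
      have hq2 : a :: b :: ys = a :: (m ++ [l]) := by rw [← hxsm]
      rw [hq2, pvAlt_step]
      simp

-- ===== VERDICT (by name: the statement is the Claim_ definition above) =====
theorem max_min3_spec : Claim_equal_max_min3 := by
  intro lst _
  unfold Spec_max_min3 max_min3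
  rw [pvLoopA_eq lst 1 (lst.length : Int) [] (by omega) (by decide)]
  simp
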